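-- pv_equiv track=rewrite | github.com/rash335/logicalCalc | yappCalculator/functions.py | decimal_binary_unsigned
-- ===== SOURCE A (Python) =====
-- def formatBinary(binary, bits):
--     string=''; string1=''
--     for item in binary: string += str(item);  # list to string
--     for i in range(0, len(string)):
--         string1+=string[i]
--         if ((i+1)%4==0) and i<(bits-1):
--             string1+=' '
--     return string1
--
-- def getInRange(num,bits):
--     rangeMin = 0
--     rangeMax = 2**(bits)-1
--     while (num>rangeMax):        num = num-2**bits;
--     while (num<rangeMin):        num=0;
--     return num
--
-- def decimal_binary_unsigned(num,bits):
--     num = getInRange(num,bits);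
--     quotient=0; remainder=0; i=0; bin_num=[];
--     while i<bits:
--         quotient = int(num/2);
--         remainder = num - 2*quotient;
--         num = quotient;        i=i+1;
--         bin_num.append(remainder);
--         binary = formatBinary(bin_num[::-1], bits)
--     return binary
-- ===== SOURCE B (Python) =====
-- def decimal_binary_unsigned(num, bits):
--     num = 0 if num < 0 else num % (2 ** bits)
--     s = format(num, '0{}b'.format(bits))
--     chunks = []
--     while s:
--         chunks.append(s[:4])
--         s = s[4:]
--     return ' '.join(chunks)
-- ===== Notes on version B (the rewrite author's own statement) =====
-- stated objective: faster
-- what changed: Replaces A's repeated-subtraction range reduction, its bits-step long-division loop (which re-runs the formatting pass on every iteration) and the per-character space-insertion loop by a direct clamp/modulo, one format() call producing the padded bit string, and a single chunk-and-join grouping pass.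
import Mathlib
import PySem

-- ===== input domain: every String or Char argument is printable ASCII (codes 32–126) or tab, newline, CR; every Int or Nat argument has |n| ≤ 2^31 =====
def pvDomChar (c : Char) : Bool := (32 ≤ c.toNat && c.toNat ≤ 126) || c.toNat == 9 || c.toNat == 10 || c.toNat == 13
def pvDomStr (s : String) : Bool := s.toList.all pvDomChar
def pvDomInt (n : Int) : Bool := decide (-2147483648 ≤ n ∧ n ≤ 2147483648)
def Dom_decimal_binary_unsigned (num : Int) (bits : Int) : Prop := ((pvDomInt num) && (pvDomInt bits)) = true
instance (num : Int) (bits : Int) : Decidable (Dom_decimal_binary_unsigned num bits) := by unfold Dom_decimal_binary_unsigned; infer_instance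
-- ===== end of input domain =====

-- B replaces A's repeated-subtraction reduction, O(bits^2) long-division/format loop and per-char
-- space insertion by a clamp/modulo, one padded-binary rendering and a single chunk-and-join pass.
-- Strings are carried as List Char (PySem.Chars) and wrapped with String.ofList on return.

-- ===== PORT A =====
-- `for item in binary: string += str(item)`
def pvFBString (binary : List Int) : List Char :=
  binary.foldl (fun acc item => acc ++ PySem.Int.toChars item) []

-- `for i in range(0, len(string)): string1 += string[i]; if (i+1)%4==0 and i<(bits-1): string1 += ' '`
def pvFBSpace (string : List Char) (bits : Int) : List Char :=
  (PySem.List.pyRange 0 (string.length : Int) 1).foldl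
    (fun acc i =>
      let acc := acc ++ [PySem.List.pyGetD string i ' ']
      if PySem.Int.mod (i + 1) 4 = 0 ∧ i < bits - 1 then acc ++ [' '] else acc) []

def formatBinary (binary : List Int) (bits : Int) : List Char :=
  pvFBSpace (pvFBString binary) bits

-- `while (num > rangeMax): num = num - 2**bits` with rangeMax = 2**bits - 1
-- (2**bits ported as 2^bits.toNat: exact for bits ≥ 0; for bits < 0 Python yields a float, outside Pre_)
def pvWhile1 (num : Int) (bits : Int) : Int :=
  if num > 2 ^ bits.toNat - 1 then pvWhile1 (num - 2 ^ bits.toNat) bits else num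
termination_by (num - (2 ^ bits.toNat - 1)).toNat
decreasing_by
  have h1 : (0:Int) < 2 ^ bits.toNat := by positivity
  omega

def getInRange (num : Int) (bits : Int) : Int :=
  let num1 := pvWhile1 num bits
  -- `while (num < rangeMin): num = 0` with rangeMin = 0: the body runs at most once, then the guard is false
  if num1 < 0 then 0 else num1

-- the while-loop of decimal_binary_unsigned; `binary` is the loop-carried variable
def pvDivLoop (num : Int) (i : Int) (bits : Int) (bin_num : List Int) (binary : List Char) : List Char :=
  if i < bits then
    let quotient := PySem.Int.truncdiv num 2      -- int(num/2): exact for |num| < 2^53 (holds on Dom)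
    let remainder := num - 2 * quotient
    let bin_num1 := bin_num ++ [remainder]
    let binary1 := formatBinary bin_num1.reverse bits   -- bin_num[::-1] (PySem.List.slice?_none_none_neg_one: reversal)
    pvDivLoop quotient (i + 1) bits bin_num1 binary1
  else binary
termination_by (bits - i).toNat
decreasing_by omega

def decimal_binary_unsigned (num : Int) (bits : Int) : String :=
  let num1 := getInRange num bits
  -- `binary` starts unbound; for bits < 1 Python raises UnboundLocalError (excluded by Pre_),
  -- so the [] initial value below is never the returned value on Pre_
  String.ofList (pvDivLoop num1 0 bits [] [])

-- ===== PORT B =====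
-- minimal binary digits of n (empty for 0); helper for format(n, '0{w}b')
def pvToBinChars (n : Nat) : List Char :=
  if h : n = 0 then [] else pvToBinChars (n / 2) ++ [if n % 2 = 1 then '1' else '0']
termination_by n
decreasing_by exact Nat.div_lt_self (Nat.pos_of_ne_zero h) (by omega)

-- format(n, '0{w}b') for n ≥ 0: minimal digits ("0" for 0) left-padded with '0' to width w
def pvFormatBin (n : Int) (w : Int) : List Char :=
  let s := if n = 0 then ['0'] else pvToBinChars n.toNat
  List.replicate (w.toNat - s.length) '0' ++ s

-- `while s: chunks.append(s[:4]); s = s[4:]`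
def pvChunks (s : List Char) : List (List Char) :=
  if h : s = [] then []
  else PySem.List.slice s none (some 4) :: pvChunks (PySem.List.slice s (some 4) none)
termination_by s.length
decreasing_by
  rw [PySem.List.slice_from s (by omega : (0:Int) ≤ 4)]
  simp only [List.length_drop]
  have := List.length_pos_of_ne_nil h
  omega

def decimal_binary_unsigned_alt (num : Int) (bits : Int) : String :=
  let n := if num < 0 then 0 else PySem.Int.mod num (2 ^ bits.toNat)  -- num % (2**bits), bits ≥ 0 on Pre_
  let s := pvFormatBin n bits
  String.ofList (PySem.Chars.join [' '] (pvChunks s))                      -- ' '.join(chunks)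

-- ===== PRECONDITION & SPEC =====
-- Pre_ excludes bits ≤ 0, on which A raises UnboundLocalError (its division loop never binds `binary`).
def Pre_decimal_binary_unsigned (num : Int) (bits : Int) : Prop := 1 ≤ bits
instance (num : Int) (bits : Int) : Decidable (Pre_decimal_binary_unsigned num bits) := by unfold Pre_decimal_binary_unsigned; infer_instance
def pvWitness_decimal_binary_unsigned : Int × Int := (5, 8)

def Spec_decimal_binary_unsigned (num : Int) (bits : Int) (out : String) : Prop := out = decimal_binary_unsigned_alt num bits
instance (num : Int) (bits : Int) (out : String) : Decidable (Spec_decimal_binary_unsigned num bits out) := by unfold Spec_decimal_binary_unsigned; infer_instance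

-- ===== CLAIM (what is proved, stated in full; the proofs are below) =====
def Claim_equal_decimal_binary_unsigned : Prop := ∀ (num : Int) (bits : Int), Dom_decimal_binary_unsigned num bits → Pre_decimal_binary_unsigned num bits → Spec_decimal_binary_unsigned num bits (decimal_binary_unsigned num bits)

-- ===== LEMMAS AND PROOFS =====

-- the LSB-first remainder list the division loop appends, written with A's own expressions
def pvLsb (n : Int) : Nat → List Int
  | 0 => []
  | Nat.succ k => (n - 2 * PySem.Int.truncdiv n 2) :: pvLsb (PySem.Int.truncdiv n 2) k

-- the padded bit string without pvFormatBin's zero special case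
def pvPadClean (n : Int) (k : Nat) : List Char :=
  List.replicate (k - (pvToBinChars n.toNat).length) '0' ++ pvToBinChars n.toNat

-- space-insertion pass of formatBinary as a structural recursion over the string, carrying the index
def pvSpGo (bits : Int) : List Char → Nat → List Char
  | [], _ => []
  | c :: cs, j =>
      c :: ((if ((j : Int) + 1) % 4 = 0 ∧ (j : Int) < bits - 1 then [' '] else []) ++ pvSpGo bits cs (j + 1))

lemma pvWhile1_eq (num bits : Int) :
    pvWhile1 num bits = if 0 ≤ num then num % (2 ^ bits.toNat : Int) else num := by
  fun_induction pvWhile1 num bits with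
  | case1 num hgt ih =>
      have h2 : (0:Int) < 2 ^ bits.toNat := by positivity
      rw [ih]
      rw [if_pos (by omega : (0:Int) ≤ num - 2 ^ bits.toNat), if_pos (by omega : (0:Int) ≤ num)]
      exact Int.sub_emod_right num _
  | case2 num hle =>
      have h2 : (0:Int) < 2 ^ bits.toNat := by positivity
      split
      · next h0 => exact (Int.emod_eq_of_lt h0 (by omega)).symm
      · rfl

lemma getInRange_eq (num bits : Int) :
    getInRange num bits = if num < 0 then 0 else PySem.Int.mod num (2 ^ bits.toNat) := by
  have h2 : (0:Int) < 2 ^ bits.toNat := by positivity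
  unfold getInRange
  rw [pvWhile1_eq]
  by_cases h : num < 0
  · rw [if_neg (by omega : ¬ (0:Int) ≤ num), if_pos h, if_pos h]
  · rw [if_pos (by omega : (0:Int) ≤ num), PySem.Int.mod_eq_emod_of_pos h2,
      if_neg (not_lt.mpr (Int.emod_nonneg num (by omega))), if_neg h]

lemma pvDivLoop_eq (bits : Int) :
    ∀ (k : Nat) (num i : Int) (bin_num : List Int) (binary : List Char),
      i < bits → k = (bits - i).toNat →
      pvDivLoop num i bits bin_num binary
        = formatBinary ((bin_num ++ pvLsb num k).reverse) bits := by
  intro k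
  induction k with
  | zero => intro num i bin_num binary hi hk; omega
  | succ k ih =>
      intro num i bin_num binary hi hk
      rw [pvDivLoop, if_pos hi]
      by_cases h2 : i + 1 < bits
      · rw [ih _ _ _ _ h2 (by omega)]
        simp [pvLsb, List.append_assoc]
      · have hk0 : k = 0 := by omega
        rw [pvDivLoop, if_neg h2]
        simp [hk0, pvLsb]

lemma pvToBinChars_succ (m : Nat) (h : m ≠ 0) :
    pvToBinChars m = pvToBinChars (m / 2) ++ [if m % 2 = 1 then '1' else '0'] := by
  rw [pvToBinChars]; simp [h]

lemma pvTruncdiv_natCast (m : Nat) : PySem.Int.truncdiv (m : Int) 2 = ((m / 2 : Nat) : Int) := by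
  simp [PySem.Int.truncdiv, Int.tdiv]

lemma pvFBString_append_singleton (X : List Int) (y : Int) :
    pvFBString (X ++ [y]) = pvFBString X ++ PySem.Int.toChars y := by
  simp only [pvFBString, List.foldl_append, List.foldl_cons, List.foldl_nil]

lemma pvFBString_lsb (k : Nat) : ∀ (m : Nat), m < 2 ^ k →
    pvFBString ((pvLsb (m : Int) k).reverse) = pvPadClean (m : Int) k := by
  induction k with
  | zero =>
      intro m hm
      interval_cases m
      simp [pvLsb, pvFBString, pvPadClean, pvToBinChars]
  | succ k ih =>
      intro m hm
      have hq : PySem.Int.truncdiv (m : Int) 2 = ((m / 2 : Nat) : Int) := pvTruncdiv_natCast m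
      have hr : (m : Int) - 2 * ((m / 2 : Nat) : Int) = ((m % 2 : Nat) : Int) := by
        push_cast; omega
      have hfold : pvFBString ((pvLsb (m : Int) (k+1)).reverse)
          = pvFBString ((pvLsb ((m / 2 : Nat) : Int) k).reverse)
            ++ PySem.Int.toChars ((m % 2 : Nat) : Int) := by
        simp only [pvLsb, hq, hr, List.reverse_cons]
        exact pvFBString_append_singleton _ _
      rw [hfold, ih (m / 2) (by omega)]
      -- both sides are the padded digits of m
      by_cases hm0 : m = 0
      · subst hm0
        show pvPadClean ((0:Nat) : Int) k ++ PySem.Int.toChars ((0 % 2 : Nat) : Int)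
            = pvPadClean ((0:Nat) : Int) (k+1)
        have h0 : pvToBinChars (((0:Nat):Int)).toNat = [] := by simp [pvToBinChars]
        have hc0 : PySem.Int.toChars ((0 % 2 : Nat) : Int) = ['0'] := rfl
        simp only [pvPadClean, h0, hc0, List.append_nil, Nat.sub_zero, List.length_nil]
        simp [List.replicate_succ']
      · have hdig : pvToBinChars m = pvToBinChars (m / 2) ++ [if m % 2 = 1 then '1' else '0'] :=
          pvToBinChars_succ m hm0
        have hchars : PySem.Int.toChars ((m % 2 : Nat) : Int) = [if m % 2 = 1 then '1' else '0'] := by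
          have : m % 2 = 0 ∨ m % 2 = 1 := by omega
          rcases this with h | h <;> simp [h] <;> rfl
        simp only [pvPadClean, hdig, hchars, Int.toNat_natCast]
        rw [List.length_append]
        simp only [List.length_singleton]
        have : k + 1 - ((pvToBinChars (m / 2)).length + 1) = k - (pvToBinChars (m / 2)).length := by
          omega
        rw [this, List.append_assoc]

lemma pvToBinChars_length_le (k : Nat) : ∀ m : Nat, m < 2 ^ k → (pvToBinChars m).length ≤ k := by
  induction k with
  | zero => intro m hm; interval_cases m; simp [pvToBinChars]
  | succ k ih =>
      intro m hm
      by_cases hm0 : m = 0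
      · subst hm0; simp [pvToBinChars]
      · rw [pvToBinChars_succ m hm0]
        have := ih (m / 2) (by omega)
        simp [List.length_append]
        omega

lemma pvPadClean_length (n : Int) (k : Nat) (h : (pvToBinChars n.toNat).length ≤ k) :
    (pvPadClean n k).length = k := by
  simp [pvPadClean]
  omega

lemma pvFormatBin_eq_padClean (n bits : Int) (hb : 1 ≤ bits) :
    pvFormatBin n bits = pvPadClean n bits.toNat := by
  by_cases hn : n = 0
  · subst hn
    have h1 : (pvToBinChars (Int.toNat 0)) = [] := by simp [pvToBinChars]
    simp only [pvFormatBin, pvPadClean, h1]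
    obtain ⟨k, hk⟩ : ∃ k, bits.toNat = k + 1 := ⟨bits.toNat - 1, by omega⟩
    simp [hk, List.replicate_succ']
  · simp [pvFormatBin, pvPadClean, hn]

-- the index-fold of pvFBSpace equals pvSpGo
lemma pvFBSpace_go (bits : Int) :
    ∀ (t pre acc : List Char),
      (List.range' pre.length t.length).foldl
        (fun acc k =>
          let acc := acc ++ [(pre ++ t).getD k ' ']
          if ((k : Int) + 1) % 4 = 0 ∧ (k : Int) < bits - 1 then acc ++ [' '] else acc) acc
        = acc ++ pvSpGo bits t pre.length := by
  intro t
  induction t with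
  | nil => intro pre acc; simp [pvSpGo]
  | cons c cs ih =>
      intro pre acc
      rw [List.length_cons, List.range'_succ, List.foldl_cons]
      have hget : (pre ++ c :: cs).getD pre.length ' ' = c := by
        simp [List.getD]
      have hpre : (pre ++ [c]).length = pre.length + 1 := by simp
      have hre : pre ++ c :: cs = (pre ++ [c]) ++ cs := by simp
      simp only [hget]
      by_cases hc : ((pre.length : Int) + 1) % 4 = 0 ∧ (pre.length : Int) < bits - 1
      · rw [if_pos hc, hre]
        rw [show pre.length + 1 = (pre ++ [c]).length from hpre.symm]
        rw [ih (pre ++ [c]) (acc ++ [c] ++ [' '])]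
        simp only [pvSpGo, hpre, if_pos hc]
        simp [List.append_assoc]
      · rw [if_neg hc, hre]
        rw [show pre.length + 1 = (pre ++ [c]).length from hpre.symm]
        rw [ih (pre ++ [c]) (acc ++ [c])]
        simp only [pvSpGo, hpre, if_neg hc]
        simp [List.append_assoc]

lemma pvFBSpace_eq_go (s : List Char) (bits : Int) :
    pvFBSpace s bits = pvSpGo bits s 0 := by
  unfold pvFBSpace
  rw [PySem.List.pyRange_one]
  have h2 : ((s.length : Int) - 0).toNat = s.length := by omega
  rw [h2, List.range_eq_range', List.foldl_map]
  have hmod : ∀ k : Nat, PySem.Int.mod ((0 : Int) + (k : Int) + 1) 4 = ((k : Int) + 1) % 4 := by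
    intro k; rw [PySem.Int.mod_eq_emod_of_pos (by omega)]; ring_nf
  have := pvFBSpace_go bits s [] []
  simp only [List.nil_append, List.length_nil] at this
  rw [← this]
  apply PySem.List.foldl_congr_mem
  intro acc k _
  simp only [zero_add]
  simp [PySem.List.pyGetD_natCast]

lemma pvChunks_cons4 (a b c d : Char) (t : List Char) :
    pvChunks (a :: b :: c :: d :: t) = [a, b, c, d] :: pvChunks t := by
  rw [pvChunks]
  rw [dif_neg (by simp : ¬ (a :: b :: c :: d :: t = []))]
  have h4 : PySem.List.slice (a :: b :: c :: d :: t) none (some 4) = [a,b,c,d] := by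
    rw [PySem.List.slice_to _ (by omega : (0:Int) ≤ 4)]; rfl
  have h4' : PySem.List.slice (a :: b :: c :: d :: t) (some 4) none = t := by
    rw [PySem.List.slice_from _ (by omega : (0:Int) ≤ 4)]; rfl
  rw [h4, h4']

lemma pvChunks_short (s : List Char) (h0 : s ≠ []) (h4 : s.length ≤ 4) :
    pvChunks s = [s] := by
  rw [pvChunks, dif_neg h0]
  have hto : PySem.List.slice s none (some 4) = s := by
    rw [PySem.List.slice_to _ (by omega : (0:Int) ≤ 4)]
    exact List.take_of_length_le (by omega)
  have hfrom : PySem.List.slice s (some 4) none = [] := by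
    rw [PySem.List.slice_from _ (by omega : (0:Int) ≤ 4)]
    exact List.drop_eq_nil_of_le (by omega)
  rw [hto, hfrom, pvChunks]
  simp

lemma pvSpGo_eq_join (bits : Int) :
    ∀ (n : Nat) (s : List Char) (j : Nat), s.length ≤ n → s ≠ [] → 4 ∣ j →
      j + s.length = bits.toNat →
      pvSpGo bits s j = PySem.Chars.join [' '] (pvChunks s) := by
  intro n
  induction n with
  | zero => intro s j h1 h2; simp_all [List.length_eq_zero_iff]
  | succ n ih =>
      intro s j hlen hne hdvd htot
      match s with
      | [] => exact absurd rfl hne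
      | [a] =>
          rw [pvChunks_short [a] (by simp) (by simp), PySem.Chars.join_singleton]
          simp only [List.length_cons, List.length_nil] at htot
          have : ¬ ((j:Int) < bits - 1) := by omega
          simp [pvSpGo, this]
      | [a, b] =>
          rw [pvChunks_short _ (by simp) (by simp), PySem.Chars.join_singleton]
          simp only [List.length_cons, List.length_nil] at htot
          have h1 : ¬ (((j:Int) + 1) % 4 = 0) := by omega
          have h2 : ¬ (((j:Int) + 1 + 1) % 4 = 0) := by omega
          simp [pvSpGo, h1, h2]
      | [a, b, c] =>
          rw [pvChunks_short _ (by simp) (by simp), PySem.Chars.join_singleton]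
          simp only [List.length_cons, List.length_nil] at htot
          have h1 : ¬ (((j:Int) + 1) % 4 = 0) := by omega
          have h2 : ¬ (((j:Int) + 1 + 1) % 4 = 0) := by omega
          have h3 : ¬ (((j:Int) + 1 + 1 + 1) % 4 = 0) := by omega
          simp [pvSpGo, h1, h2, h3]
      | a :: b :: c :: d :: t =>
          have h1 : ¬ (((j:Int) + 1) % 4 = 0) := by omega
          have h2 : ¬ (((j:Int) + 1 + 1) % 4 = 0) := by omega
          have h3 : ¬ (((j:Int) + 1 + 1 + 1) % 4 = 0) := by omega
          have h4 : ((j:Int) + 1 + 1 + 1 + 1) % 4 = 0 := by omega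
          rw [pvChunks_cons4]
          cases t with
          | nil =>
              have hnilc : pvChunks ([] : List Char) = [] := by simp [pvChunks]
              rw [hnilc, PySem.Chars.join_singleton]
              simp only [List.length_cons, List.length_nil] at htot
              have : ¬ ((j:Int) + 1 + 1 + 1 < bits - 1) := by omega
              simp [pvSpGo, h1, h2, h3, this]
          | cons e t' =>
              simp only [List.length_cons] at htot hlen
              have hlt : (j:Int) + 1 + 1 + 1 < bits - 1 := by omega
              have hrec := ih (e :: t') (j + 4) (by simp; omega) (by simp)
                (by omega) (by simp; omega)
              have hjoin : PySem.Chars.join [' '] ([a,b,c,d] :: pvChunks (e :: t')) =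
                  [a,b,c,d] ++ [' '] ++ PySem.Chars.join [' '] (pvChunks (e :: t')) := by
                rw [pvChunks, dif_neg (by simp : ¬ (e :: t' = []))]
                exact PySem.Chars.join_cons_cons _ _ _ _
              rw [hjoin, ← hrec]
              have hj4 : j + 1 + 1 + 1 + 1 = j + 4 := by omega
              simp [pvSpGo, h1, h2, h3, h4, hlt, hj4]

-- ===== VERDICT (by name: the statement is the Claim_ definition above) =====
theorem decimal_binary_unsigned_spec : Claim_equal_decimal_binary_unsigned := by
  intro num bits _ hpre
  have hb : 1 ≤ bits := hpre
  unfold Spec_decimal_binary_unsigned decimal_binary_unsigned decimal_binary_unsigned_alt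
  have h2 : (0:Int) < 2 ^ bits.toNat := by positivity
  show String.ofList (pvDivLoop (getInRange num bits) 0 bits [] [])
      = String.ofList (PySem.Chars.join [' ']
          (pvChunks (pvFormatBin (if num < 0 then 0 else PySem.Int.mod num (2 ^ bits.toNat)) bits)))
  set n : Int := if num < 0 then 0 else PySem.Int.mod num (2 ^ bits.toNat) with hn
  have hn0 : 0 ≤ n := by
    rw [hn]; split
    · omega
    · exact PySem.Int.mod_nonneg num h2
  have hnlt : n < 2 ^ bits.toNat := by
    rw [hn]; split
    · omega
    · exact PySem.Int.mod_lt num h2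
  obtain ⟨m, hm⟩ : ∃ m : Nat, n = (m : Int) := ⟨n.toNat, by omega⟩
  have hA1 : getInRange num bits = n := getInRange_eq num bits
  rw [hA1]
  rw [pvDivLoop_eq bits bits.toNat n 0 [] [] (by omega) (by omega)]
  simp only [List.nil_append]
  unfold formatBinary
  have hmlt : m < 2 ^ bits.toNat := by
    have : ((2:Int) ^ bits.toNat) = ((2 ^ bits.toNat : Nat) : Int) := by push_cast; ring
    omega
  rw [hm, pvFBString_lsb bits.toNat m hmlt]
  rw [← hm]
  have hlenle : (pvToBinChars n.toNat).length ≤ bits.toNat := by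
    apply pvToBinChars_length_le
    have : ((2:Int) ^ bits.toNat) = ((2 ^ bits.toNat : Nat) : Int) := by push_cast; ring
    omega
  have hlen : (pvPadClean n bits.toNat).length = bits.toNat := pvPadClean_length n bits.toNat hlenle
  rw [pvFBSpace_eq_go]
  rw [pvSpGo_eq_join bits (pvPadClean n bits.toNat).length (pvPadClean n bits.toNat) 0
    (le_refl _) (by intro hnil; rw [hnil] at hlen; simp at hlen; omega) ⟨0, rfl⟩ (by omega)]
  rw [pvFormatBin_eq_padClean n bits hb]
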